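-- pv_equiv track=rewrite | github.com/hmnhGeek/Data-Structures-Algorithms | Python/Practice Set 8/Sliding Windows/L2 - Maximum points you can obtain from cards.py | get_max_points
-- ===== SOURCE A (Python) =====
-- def get_max_points(cards, k):
--     """
--         Time complexity is O(k) and space complexity is O(1).
--     """
--     n = len(cards)
--     i, j = k - 1, n
--     max_points = tracking_points = sum(cards[:k])
--     while i >= 0:
--         tracking_points -= cards[i]
--         i -= 1
--         j -= 1
--         tracking_points += cards[j]
--         max_points = max(max_points, tracking_points)
--     return max_points
-- ===== SOURCE B (Python) =====
-- def get_max_points(cards, k):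
--     n = len(cards)
--     total = 0
--     left = [0]
--     for i in range(k):
--         total += cards[i]
--         left.append(total)
--     total = 0
--     right = [0]
--     for t in range(k):
--         total += cards[n - 1 - t]
--         right.append(total)
--     return max(left[i] + right[k - i] for i in range(k + 1))
-- ===== Notes on version B (the rewrite author's own statement) =====
-- stated objective: alternative
-- what changed: Replaces A's incremental sliding-window shift (one running tracking sum updated card by card) with two precomputed prefix/suffix sum tables and a single pass over all k+1 split points taking max(left[i]+right[k-i]).
-- outside the precondition, e.g. on get_max_points([1, 2, 3], -1): A returns 3, B raises ValueError
import Mathlib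
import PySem

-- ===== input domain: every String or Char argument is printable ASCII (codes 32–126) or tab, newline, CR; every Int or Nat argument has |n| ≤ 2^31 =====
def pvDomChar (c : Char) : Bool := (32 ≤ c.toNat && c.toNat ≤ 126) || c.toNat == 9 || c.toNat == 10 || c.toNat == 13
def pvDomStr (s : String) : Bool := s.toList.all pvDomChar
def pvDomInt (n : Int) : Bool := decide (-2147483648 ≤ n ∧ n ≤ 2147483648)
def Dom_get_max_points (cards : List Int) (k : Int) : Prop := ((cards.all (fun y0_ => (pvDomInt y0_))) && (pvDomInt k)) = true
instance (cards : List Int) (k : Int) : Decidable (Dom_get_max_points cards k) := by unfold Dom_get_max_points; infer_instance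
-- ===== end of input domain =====

-- B replaces A's incremental sliding-window update by prefix/suffix sum tables and a
-- max over the k+1 split points: an alternative decomposition, same O(k) cost.

-- ===== PORT A =====
-- A's while loop; the counter is i+1 (the loop runs while i ≥ 0).
-- pyGetD is exact here because Pre_ puts every index the loop touches in range
-- (outside Pre_ the Python raises IndexError).
def pvLoopA (cards : List Int) : Nat → Int → Int → Int → Int
  | 0, _, _, maxp => maxp
  | m + 1, j, tr, maxp =>
    let tr1 := tr - PySem.List.pyGetD cards (m : Int) 0
    let j1 := j - 1
    let tr2 := tr1 + PySem.List.pyGetD cards j1 0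
    pvLoopA cards m j1 tr2 (max maxp tr2)

def get_max_points (cards : List Int) (k : Int) : Int :=
  let n : Int := cards.length
  let s := (PySem.List.slice cards none (some k)).sum
  pvLoopA cards k.toNat n s s

-- ===== PORT B =====
-- left/right prefix- and suffix-sum tables built by the two for-loops of Source B,
-- then max() over the k+1 split values.
def get_max_points_alt (cards : List Int) (k : Int) : Int :=
  let n : Int := cards.length
  let left := ((PySem.List.pyRange 0 k 1).foldl
      (fun (p : Int × List Int) i =>
        let t := p.1 + PySem.List.pyGetD cards i 0; (t, p.2 ++ [t])) (0, [0])).2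
  let right := ((PySem.List.pyRange 0 k 1).foldl
      (fun (p : Int × List Int) t =>
        let s := p.1 + PySem.List.pyGetD cards (n - 1 - t) 0; (s, p.2 ++ [s])) (0, [0])).2
  let vals := (PySem.List.pyRange 0 (k + 1) 1).map
      (fun i => PySem.List.pyGetD left i 0 + PySem.List.pyGetD right (k - i) 0)
  (PySem.List.max? vals (fun y => y)).getD 0

-- ===== PRECONDITION & SPEC =====
-- Pre_ excludes k > len(cards), on which A raises IndexError, and k < 0, on which A's value
-- sum(cards[:k]) (all but the last |k| cards) is an accident of Python slicing while B's
-- max() over an empty generator raises ValueError.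
def Pre_get_max_points (cards : List Int) (k : Int) : Prop := 0 ≤ k ∧ k ≤ cards.length
instance (cards : List Int) (k : Int) : Decidable (Pre_get_max_points cards k) := by
  unfold Pre_get_max_points; infer_instance

def pvWitness_get_max_points : List Int × Int := ([1, 2, 3], 2)

def Spec_get_max_points (cards : List Int) (k : Int) (out : Int) : Prop := out = get_max_points_alt cards k
instance (cards : List Int) (k : Int) (out : Int) : Decidable (Spec_get_max_points cards k out) := by unfold Spec_get_max_points; infer_instance

-- ===== CLAIM (what is proved, stated in full; the proofs are below) =====
def Claim_equal_get_max_points : Prop := ∀ (cards : List Int) (k : Int), Dom_get_max_points cards k → Pre_get_max_points cards k → Spec_get_max_points cards k (get_max_points cards k)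

-- ===== LEMMAS AND PROOFS =====

-- sum of the first m cards
def pvPre (cards : List Int) (m : Nat) : Int := (cards.take m).sum
-- sum of the last j cards
def pvSuf (cards : List Int) (j : Nat) : Int := (cards.drop (cards.length - j)).sum
-- value of the split "m cards from the front, k - m cards from the back"
def pvV (cards : List Int) (k m : Nat) : Int := pvPre cards m + pvSuf cards (k - m)

theorem pvPre_succ (cards : List Int) (m : Nat) (h : m < cards.length) :
    pvPre cards (m + 1) = pvPre cards m + cards.getD m 0 := by
  rw [List.getD_eq_getElem cards 0 h]; exact List.sum_take_succ cards m h

theorem pvSuf_succ (cards : List Int) (j : Nat) (h1 : j + 1 ≤ cards.length) :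
    pvSuf cards (j + 1) = cards.getD (cards.length - (j + 1)) 0 + pvSuf cards j := by
  unfold pvSuf
  rw [List.drop_eq_getElem_cons (l := cards) (i := cards.length - (j + 1)) (by omega)]
  have h2 : cards.length - (j + 1) + 1 = cards.length - j := by omega
  rw [h2, List.sum_cons, List.getD_eq_getElem cards 0 (by omega)]

theorem pvLoopA_step (cards : List Int) (m : Nat) (j tr maxp : Int) :
    pvLoopA cards (m + 1) j tr maxp =
      pvLoopA cards m (j - 1)
        (tr - PySem.List.pyGetD cards (m : Int) 0 + PySem.List.pyGetD cards (j - 1) 0)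
        (max maxp (tr - PySem.List.pyGetD cards (m : Int) 0 + PySem.List.pyGetD cards (j - 1) 0)) := rfl

-- A's loop is the running max of the split values, visited from split k-1 down to 0
theorem pvLoopA_inv (cards : List Int) (k : Nat) (hk : k ≤ cards.length) :
    ∀ (c : Nat), c ≤ k → ∀ maxp : Int,
    pvLoopA cards c (((cards.length - (k - c) : Nat) : Int)) (pvV cards k c) maxp
      = List.foldl max maxp ((List.range c).reverse.map (pvV cards k)) := by
  intro c
  induction c with
  | zero => intro _ maxp; simp [pvLoopA]
  | succ m ih =>
    intro hc maxp
    have hmn : m < cards.length := lt_of_lt_of_le hc hk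
    rw [pvLoopA_step]
    have hj : ((cards.length - (k - (m + 1)) : Nat) : Int) - 1
        = ((cards.length - (k - m) : Nat) : Int) := by omega
    have hg1 : PySem.List.pyGetD cards (m : Int) 0 = cards.getD m 0 :=
      PySem.List.pyGetD_natCast cards m 0
    have hg2 : PySem.List.pyGetD cards (((cards.length - (k - m) : Nat) : Int)) 0
        = cards.getD (cards.length - (k - m)) 0 :=
      PySem.List.pyGetD_natCast cards _ 0
    have htr : pvV cards k (m + 1) - cards.getD m 0 + cards.getD (cards.length - (k - m)) 0
        = pvV cards k m := by
      have hsuf := pvSuf_succ cards (k - (m + 1)) (by omega)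
      have e1 : k - (m + 1) + 1 = k - m := by omega
      simp only [e1] at hsuf
      unfold pvV
      rw [pvPre_succ cards m hmn, hsuf]
      ring
    rw [hj, hg1, hg2, htr]
    rw [ih (by omega) (max maxp (pvV cards k m))]
    rw [List.range_succ]
    simp only [List.reverse_append, List.reverse_cons, List.reverse_nil, List.nil_append,
      List.map_cons, List.cons_append, List.foldl_cons]

theorem foldl_max_pull (l : List Int) : ∀ a b : Int,
    List.foldl max (max a b) l = max (List.foldl max a l) b := by
  induction l with
  | nil => intro a b; rfl
  | cons x t ih =>
    intro a b
    simp only [List.foldl_cons]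
    rw [max_right_comm a b x, ih]

theorem foldl_max_rev (f : Nat → Int) : ∀ (c : Nat) (a : Int),
    List.foldl max a ((List.range c).reverse.map f) = List.foldl max a ((List.range c).map f) := by
  intro c
  induction c with
  | zero => intro a; rfl
  | succ m ih =>
    intro a
    rw [List.range_succ]
    simp only [List.reverse_append, List.reverse_cons, List.reverse_nil, List.nil_append,
      List.map_cons, List.map_append, List.cons_append, List.foldl_cons, List.map_nil,
      List.foldl_append, List.foldl_nil]
    rw [ih, foldl_max_pull]

theorem portA_eq (cards : List Int) (k : Int) (h0 : 0 ≤ k) (h1 : k ≤ cards.length) :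
    get_max_points cards k
      = List.foldl max (pvV cards k.toNat k.toNat) ((List.range k.toNat).map (pvV cards k.toNat)) := by
  unfold get_max_points
  have hs : (PySem.List.slice cards none (some k)).sum = pvV cards k.toNat k.toNat := by
    rw [PySem.List.slice_to cards h0]
    unfold pvV pvPre pvSuf
    simp
  have hn : (cards.length : Int) = ((cards.length - (k.toNat - k.toNat) : Nat) : Int) := by omega
  simp only [hs, hn]
  rw [pvLoopA_inv cards k.toNat (by omega) k.toNat le_rfl, foldl_max_rev]

theorem leftFold (cards : List Int) : ∀ (c : Nat), c ≤ cards.length →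
    (PySem.List.pyRange 0 (c : Int) 1).foldl
      (fun (p : Int × List Int) i =>
        let t := p.1 + PySem.List.pyGetD cards i 0; (t, p.2 ++ [t])) ((0 : Int), ([0] : List Int))
    = (pvPre cards c, (List.range (c + 1)).map (pvPre cards)) := by
  intro c
  induction c with
  | zero =>
    intro _
    rw [PySem.List.pyRange_one_eq_nil (by omega)]
    simp [pvPre]
  | succ m ih =>
    intro hc
    have hcast : ((m + 1 : Nat) : Int) = (m : Int) + 1 := by push_cast; ring
    rw [hcast, PySem.List.pyRange_one_succ_right (by omega), List.foldl_append,
      ih (by omega)]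
    simp only [List.foldl_cons, List.foldl_nil]
    rw [PySem.List.pyGetD_natCast cards m 0]
    rw [← pvPre_succ cards m (by omega)]
    rw [List.range_succ (n := m + 1), List.map_append, List.map_singleton]

theorem rightFold (cards : List Int) : ∀ (c : Nat), c ≤ cards.length →
    (PySem.List.pyRange 0 (c : Int) 1).foldl
      (fun (p : Int × List Int) t =>
        let s := p.1 + PySem.List.pyGetD cards ((cards.length : Int) - 1 - t) 0; (s, p.2 ++ [s]))
      ((0 : Int), ([0] : List Int))
    = (pvSuf cards c, (List.range (c + 1)).map (pvSuf cards)) := by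
  intro c
  induction c with
  | zero =>
    intro _
    rw [PySem.List.pyRange_one_eq_nil (by omega)]
    simp [pvSuf]
  | succ m ih =>
    intro hc
    have hcast : ((m + 1 : Nat) : Int) = (m : Int) + 1 := by push_cast; ring
    rw [hcast, PySem.List.pyRange_one_succ_right (by omega), List.foldl_append,
      ih (by omega)]
    simp only [List.foldl_cons, List.foldl_nil]
    have hidx : (cards.length : Int) - 1 - (m : Int) = ((cards.length - (m + 1) : Nat) : Int) := by
      omega
    rw [hidx, PySem.List.pyGetD_natCast cards _ 0]
    have hsuf : pvSuf cards m + cards.getD (cards.length - (m + 1)) 0 = pvSuf cards (m + 1) := by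
      rw [pvSuf_succ cards m hc]; ring
    rw [hsuf, List.range_succ (n := m + 1), List.map_append, List.map_singleton]

theorem getD_map_range_pv (f : Nat → Int) (n m : Nat) (h : m < n) :
    (PySem.List.pyGetD ((List.range n).map f) (m : Int) 0) = f m := by
  rw [PySem.List.pyGetD_natCast]
  rw [List.getD_eq_getElem _ 0 (by simpa using h)]
  simp

theorem portB_eq (cards : List Int) (k : Int) (h0 : 0 ≤ k) (h1 : k ≤ cards.length) :
    get_max_points_alt cards k
      = ((List.range k.toNat).map (fun m => pvV cards k.toNat (m + 1))).foldl max
          (pvV cards k.toNat 0) := by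
  unfold get_max_points_alt
  have hk : k = ((k.toNat : Nat) : Int) := by omega
  have hkn : k.toNat ≤ cards.length := by omega
  rw [hk]
  simp only [leftFold cards k.toNat hkn, rightFold cards k.toNat hkn]
  have hvals : (PySem.List.pyRange 0 ((k.toNat : Int) + 1) 1).map
      (fun i => PySem.List.pyGetD ((List.range (k.toNat + 1)).map (pvPre cards)) i 0 +
        PySem.List.pyGetD ((List.range (k.toNat + 1)).map (pvSuf cards)) ((k.toNat : Int) - i) 0)
      = (List.range (k.toNat + 1)).map (pvV cards k.toNat) := by
    apply List.ext_getElem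
    · simp [PySem.List.length_pyRange_one]
      omega
    · intro i hi1 hi2
      simp only [List.getElem_map, PySem.List.getElem_pyRange_one, zero_add]
      rw [List.length_map, List.length_range] at hi2
      have hd : ((k.toNat : Int) - ((i : Nat) : Int)) = (((k.toNat - i : Nat)) : Int) := by
        omega
      rw [getD_map_range_pv (pvPre cards) _ i hi2, hd,
        getD_map_range_pv (pvSuf cards) _ _ (by omega), List.getElem_range]
      rfl
  rw [hvals, List.range_succ_eq_map, List.map_cons, PySem.List.max?_id_cons]
  simp only [Option.getD_some, List.map_map]
  rfl

theorem foldl_max_cons_pull (a x : Int) (t : List Int) :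
    List.foldl max a (x :: t) = max a (List.foldl max x t) := by
  simp only [List.foldl_cons]
  rw [max_comm a x, foldl_max_pull, max_comm]

-- the two running maxima range over the same k+1 split values, so they are equal
theorem fold_assemble (V : Nat → Int) (c : Nat) :
    List.foldl max (V c) ((List.range c).map V)
      = ((List.range c).map (fun m => V (m + 1))).foldl max (V 0) := by
  set A := List.foldl max (V c) ((List.range c).map V) with hA
  set B := ((List.range c).map (fun m => V (m + 1))).foldl max (V 0) with hB
  have hfull : (List.range (c + 1)).map V
      = V 0 :: (List.range c).map (fun m => V (m + 1)) := by
    rw [List.range_succ_eq_map, List.map_cons, List.map_map]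
    rfl
  have h1 : List.foldl max (V c) ((List.range (c + 1)).map V) = A := by
    rw [List.range_succ, List.map_append, List.foldl_append]
    simp only [List.map_cons, List.map_nil, List.foldl_cons, List.foldl_nil]
    exact max_eq_left (PySem.List.le_foldl_max _ _).1
  have h2 : List.foldl max (V c) ((List.range (c + 1)).map V) = max (V c) B := by
    rw [hfull, foldl_max_cons_pull]
  have h4 : V c ≤ B := by
    rcases Nat.eq_zero_or_pos c with h | h
    · subst h; simp [hB]
    · have hm : V c ∈ (List.range c).map (fun m => V (m + 1)) := by
        have : c - 1 ∈ List.range c := by rw [List.mem_range]; omega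
        have := List.mem_map_of_mem (f := fun m => V (m + 1)) this
        simpa [Nat.sub_add_cancel h] using this
      exact (PySem.List.le_foldl_max _ _).2 _ hm
  rw [← h1, h2, max_eq_right h4]

-- ===== VERDICT (by name: the statement is the Claim_ definition above) =====
theorem get_max_points_spec : Claim_equal_get_max_points := by
  intro cards k _ hpre
  obtain ⟨h0, h1⟩ := hpre
  unfold Spec_get_max_points
  rw [portA_eq cards k h0 h1, portB_eq cards k h0 h1, fold_assemble]
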